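-- pv_equiv track=rewrite | github.com/estraviz/codewars | 7_kyu/Down Arrow With Numbers/get_a_down_arrow_of.py | get_a_down_arrow_of
-- ===== SOURCE A (Python) =====
-- def get_a_down_arrow_of(n):
--     output = []
--     k = n
--     while k > 0:
--         left = ''.join(str(i)[-1] for i in range(1, k))
--         middle = str(k)[-1]
--         right = left[::-1]
--         output.append(left + middle + right + '\n' + ' ' *
--                       (n - k + 1)) if k > 1 else output.append(middle)
--         k -= 1
--     return ''.join(output)
-- ===== SOURCE B (Python) =====
-- def get_a_down_arrow_of(n):
--     full = ''.join(str(i)[-1] for i in range(1, n + 1))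
--     rows = [' ' * (n - k) + full[:k] + full[:k - 1][::-1]
--             for k in range(n, 0, -1)]
--     return '\n'.join(rows)
-- ===== Notes on version B (the rewrite author's own statement) =====
-- stated objective: alternative
-- what changed: Builds the full last-digit string once and forms every row by slicing its prefixes (rows joined with '\n', indentation as leading spaces), instead of A's while-loop that regenerates all digit characters from scratch for every row and encodes indentation as trailing spaces appended after each newline with a special case for the bottom row.
import Mathlib
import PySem

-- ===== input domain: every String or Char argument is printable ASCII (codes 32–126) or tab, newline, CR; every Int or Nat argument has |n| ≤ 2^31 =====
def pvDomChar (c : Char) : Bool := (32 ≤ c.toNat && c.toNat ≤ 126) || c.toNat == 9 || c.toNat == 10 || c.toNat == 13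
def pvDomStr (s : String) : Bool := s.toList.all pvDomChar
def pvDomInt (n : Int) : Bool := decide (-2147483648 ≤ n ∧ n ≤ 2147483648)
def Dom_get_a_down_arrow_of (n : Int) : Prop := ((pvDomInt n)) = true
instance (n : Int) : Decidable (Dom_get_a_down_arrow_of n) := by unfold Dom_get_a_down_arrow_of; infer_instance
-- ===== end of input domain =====

-- B builds the full last-digit string once and slices its prefixes per row (rows joined with '\n',
-- indentation as leading spaces), instead of A's while-loop that rebuilds each row's digits and
-- appends trailing-space indentation after each newline with a bottom-row special case;
-- objective: alternative decomposition.

-- ===== PORT A =====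
-- str(i)[-1]: str(i) is never empty, so the IndexError (none) branch is unreachable
def pvA_last (i : Int) : List Char :=
  match PySem.List.pyGet? (PySem.Int.toChars i) (-1) with
  | some c => [c]
  | none => []

def pvA_loop (n : Int) : Nat → Int → List (List Char) → List (List Char)
  | 0, _, output => output
  | fuel + 1, k, output =>
    if 0 < k then
      let left := PySem.Chars.join [] ((PySem.List.pyRange 1 k 1).map pvA_last)
      let middle := pvA_last k
      let right := (PySem.List.slice? left none none (-1)).getD []
      let output :=
        if 1 < k then
          output ++ [left ++ middle ++ right ++ ['\n'] ++ PySem.List.pyRepeat [' '] (n - k + 1)]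
        else output ++ [middle]
      pvA_loop n fuel (k - 1) output
    else output

def get_a_down_arrow_of (n : Int) : String :=
  String.ofList (PySem.Chars.join [] (pvA_loop n n.toNat n []))

-- ===== PORT B =====
-- str(i)[-1] inside B's table-building comprehension (same remark: never raises)
def pvB_last (i : Int) : List Char :=
  match PySem.List.pyGet? (PySem.Int.toChars i) (-1) with
  | some c => [c]
  | none => []

-- one row: ' ' * (n - k) + full[:k] + full[:k-1][::-1]
def pvB_row (n : Int) (full : List Char) (k : Int) : List Char :=
  PySem.List.pyRepeat [' '] (n - k) ++ PySem.List.slice full none (some k) ++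
    (PySem.List.slice? (PySem.List.slice full none (some (k - 1))) none none (-1)).getD []

def get_a_down_arrow_of_alt (n : Int) : String :=
  let full := PySem.Chars.join [] ((PySem.List.pyRange 1 (n + 1) 1).map pvB_last)
  String.ofList (PySem.Chars.join ['\n'] ((PySem.List.pyRange n 0 (-1)).map (pvB_row n full)))

-- ===== PRECONDITION & SPEC =====
def Spec_get_a_down_arrow_of (n : Int) (out : String) : Prop := out = get_a_down_arrow_of_alt n
instance (n : Int) (out : String) : Decidable (Spec_get_a_down_arrow_of n out) := by unfold Spec_get_a_down_arrow_of; infer_instance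

-- ===== CLAIM (what is proved, stated in full; the proofs are below) =====
def Claim_equal_get_a_down_arrow_of : Prop := ∀ (n : Int), Dom_get_a_down_arrow_of n → Spec_get_a_down_arrow_of n (get_a_down_arrow_of n)

-- ===== LEMMAS AND PROOFS =====

-- last decimal digit (as a character) of a natural number
def pvDigit (m : Nat) : Char := (Nat.toDigits 10 m).getLastD ' '

-- the string of last digits of 1..m
def pvTable (m : Nat) : List Char := (List.range' 1 m).map pvDigit

-- A's rows for k, k-1, …, 1 (n kept as the Int A pads with)
def pvARows (n : Int) : Nat → List (List Char)
  | 0 => []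
  | 1 => [[pvDigit 1]]
  | (j + 2) =>
      (pvTable (j + 2) ++ (pvTable (j + 1)).reverse ++
        '\n' :: List.replicate (n - (j + 2 : Nat) + 1).toNat ' ') :: pvARows n (j + 1)

-- B's rows for k, k-1, …, 1
def pvBRow (n : Int) (k : Nat) : List Char :=
  List.replicate (n - (k : Int)).toNat ' ' ++ pvTable k ++ (pvTable (k - 1)).reverse

def pvBRows (n : Int) : Nat → List (List Char)
  | 0 => []
  | (j + 1) => pvBRow n (j + 1) :: pvBRows n j

lemma pvToDigitsCore_ne_nil (b : Nat) : ∀ (f n : Nat) (l : List Char), l ≠ [] →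
    Nat.toDigitsCore b f n l ≠ [] := by
  intro f
  induction f with
  | zero => intro n l h; simpa [Nat.toDigitsCore] using h
  | succ f ih =>
    intro n l h
    simp only [Nat.toDigitsCore]
    split
    · simp
    · exact ih _ _ (by simp)

lemma pvToDigits_ne_nil (n : Nat) : Nat.toDigits 10 n ≠ [] := by
  simp only [Nat.toDigits]
  cases h : n / 10 with
  | zero => simp [Nat.toDigitsCore, h]
  | succ j => simp only [Nat.toDigitsCore, h]; exact pvToDigitsCore_ne_nil 10 _ _ _ (by simp)

lemma pvA_last_cast (m : Nat) : pvA_last (m : Int) = [pvDigit m] := by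
  unfold pvA_last
  have h1 : PySem.Int.toChars (m : Int) = Nat.toDigits 10 m := by
    simp [PySem.Int.toChars]
  rw [h1, PySem.List.pyGet?_neg_one]
  cases h3 : (Nat.toDigits 10 m).getLast? with
  | none => exact absurd (List.getLast?_eq_none_iff.mp h3) (pvToDigits_ne_nil m)
  | some c => simp [pvDigit, List.getLastD_eq_getLast?, h3]

lemma pvRange_up (m : Nat) : PySem.List.pyRange 1 (1 + (m:Int)) 1 = (List.range' 1 m).map (fun i : Nat => (i : Int)) := by
  induction m with
  | zero => rfl
  | succ j ih =>
    have h : (1 : Int) + ((j+1 : Nat) : Int) = (1 + (j:Int)) + 1 := by push_cast; ring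
    rw [h, PySem.List.pyRange_one_succ_right (by omega), ih, List.range'_concat]
    simp

lemma pvRange_down (m : Nat) : PySem.List.pyRange ((m:Int)+1) 0 (-1) = ((m:Int)+1) :: PySem.List.pyRange (m:Int) 0 (-1) := by
  simp only [PySem.List.pyRange]
  norm_num
  rw [List.range_succ_eq_map, List.map_cons, List.map_map]
  have h0 : (if 0 < m then m else 0) = m := by split <;> omega
  norm_num [h0]

lemma pvRange_down_nil (n : Int) (h : n ≤ 0) : PySem.List.pyRange n 0 (-1) = [] := by
  simp [PySem.List.pyRange]; intro h2; omega

-- the joined digit table: join of the singleton digit strings of 1..m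
lemma pvJoin_table (m : Nat) :
    PySem.Chars.join [] ((PySem.List.pyRange 1 (1 + (m:Int)) 1).map pvA_last) = pvTable m := by
  rw [pvRange_up, List.map_map]
  have h : List.map (pvA_last ∘ fun i : Nat => (i : Int)) (List.range' 1 m)
      = List.map (fun c => [c]) (List.map pvDigit (List.range' 1 m)) := by
    rw [List.map_map]
    exact List.map_congr_left (fun i _ => by simp [Function.comp, pvA_last_cast])
  rw [h, PySem.Chars.join_nil_singletons]
  rfl

lemma pvTable_concat (j : Nat) : pvTable (j + 1) = pvTable j ++ [pvDigit (j + 1)] := by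
  unfold pvTable
  rw [List.range'_concat]
  simp
  congr 1
  omega

lemma pvTable_take (k m : Nat) (h : k ≤ m) : (pvTable m).take k = pvTable k := by
  unfold pvTable
  have hsplit : List.range' 1 m = List.range' 1 k ++ List.range' (1 + 1 * k) (m - k) := by
    rw [List.range'_append]
    congr 1
    omega
  rw [hsplit, List.map_append, List.take_append_of_le_length (by simp), List.take_of_length_le (by simp)]

-- Chars.join with empty separator distributes over cons
lemma pvJoin_nil_cons (p : List Char) (rest : List (List Char)) :
    PySem.Chars.join [] (p :: rest) = p ++ PySem.Chars.join [] rest := by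
  cases rest with
  | nil => simp [PySem.Chars.join_singleton, PySem.Chars.join_nil]
  | cons q t => rw [PySem.Chars.join_cons_cons]; simp

-- A's loop, run with fuel = k, emits exactly pvARows
lemma pvA_loop_eq (n : Int) : ∀ (kN : Nat) (out : List (List Char)),
    pvA_loop n kN (kN : Int) out = out ++ pvARows n kN := by
  intro kN
  induction kN with
  | zero => intro out; simp [pvA_loop, pvARows]
  | succ j ih =>
    intro out
    have hleft : PySem.Chars.join [] ((PySem.List.pyRange 1 ((j+1 : Nat) : Int) 1).map pvA_last) = pvTable j := by
      have h : ((j+1 : Nat) : Int) = 1 + (j : Int) := by push_cast; ring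
      rw [h, pvJoin_table]
    have hmid : pvA_last ((j+1 : Nat) : Int) = [pvDigit (j+1)] := pvA_last_cast (j+1)
    have hk1 : ((j+1 : Nat) : Int) - 1 = ((j : Nat) : Int) := by push_cast; ring
    rw [pvA_loop, if_pos (by push_cast; omega)]
    simp only [hleft, hmid, PySem.List.slice?_none_none_neg_one, Option.getD_some,
      PySem.List.pyRepeat_singleton, hk1]
    cases j with
    | zero =>
      rw [if_neg (by norm_num), ih]
      simp [pvARows]
    | succ i =>
      rw [if_pos (by push_cast; omega), ih]
      rw [show pvARows n (i + 1 + 1) =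
        (pvTable (i + 2) ++ (pvTable (i + 1)).reverse ++
          '\n' :: List.replicate (n - (i + 2 : Nat) + 1).toNat ' ') :: pvARows n (i + 1) from rfl]
      have htab : pvTable (i+1) ++ [pvDigit (i+1+1)] = pvTable (i+2) := (pvTable_concat (i+1)).symm
      simp only [List.append_assoc, List.cons_append, List.nil_append]
      rw [← htab]
      simp [List.append_assoc]
      omega

-- B's mapped rows equal pvBRows
lemma pvB_rows_eq (n : Int) (m : Nat) (hmn : m ≤ n.toNat) :
    (PySem.List.pyRange (m:Int) 0 (-1)).map (pvB_row n (pvTable n.toNat)) = pvBRows n m := by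
  induction m with
  | zero => simp only [Nat.cast_zero]; rw [pvRange_down_nil 0 le_rfl]; rfl
  | succ j ih =>
    have h : ((j+1 : Nat) : Int) = (j : Int) + 1 := by push_cast; ring
    rw [h, pvRange_down, List.map_cons, ih (by omega)]
    rw [pvBRows]
    congr 1
    unfold pvB_row pvBRow
    have h1 : PySem.List.slice (pvTable n.toNat) none (some ((j:Int)+1)) = pvTable (j+1) := by
      rw [PySem.List.slice_to (pvTable n.toNat) (b := (j:Int)+1) (by omega)]
      rw [show ((j:Int)+1).toNat = j + 1 by omega, pvTable_take (j+1) n.toNat (by omega)]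
    have h2 : PySem.List.slice (pvTable n.toNat) none (some ((j:Int)+1-1)) = pvTable j := by
      rw [PySem.List.slice_to (pvTable n.toNat) (b := (j:Int)+1-1) (by omega)]
      rw [show ((j:Int)+1-1).toNat = j by omega, pvTable_take j n.toNat (by omega)]
    rw [h1, h2, PySem.List.slice?_none_none_neg_one, PySem.List.pyRepeat_singleton]
    simp only [Option.getD_some, h]
    rw [show (j + 1) - 1 = j from rfl]

-- the regrouping: A's trailing spaces are B's leading indentation
lemma pvJoin_shift (n : Int) : ∀ (kN : Nat), 1 ≤ kN → (kN : Int) ≤ n →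
    List.replicate (n - (kN : Int)).toNat ' ' ++ PySem.Chars.join [] (pvARows n kN) =
      PySem.Chars.join ['\n'] (pvBRows n kN) := by
  intro kN
  induction kN with
  | zero => omega
  | succ j ih =>
    intro _ hle
    cases j with
    | zero =>
      rw [show pvARows n 1 = [[pvDigit 1]] from rfl,
        show pvBRows n 1 = [pvBRow n 1] from rfl,
        PySem.Chars.join_singleton, PySem.Chars.join_singleton]
      unfold pvBRow
      rw [show pvTable 1 = [pvDigit 1] from rfl, show pvTable (1-1) = [] from rfl]
      simp
    | succ i =>
      have hrec := ih (by omega) (by push_cast at hle ⊢; omega)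
      rw [show pvARows n (i + 1 + 1) =
        (pvTable (i + 2) ++ (pvTable (i + 1)).reverse ++
          '\n' :: List.replicate (n - (i + 2 : Nat) + 1).toNat ' ') :: pvARows n (i + 1) from rfl]
      rw [pvJoin_nil_cons]
      rw [show pvBRows n (i + 1 + 1) = pvBRow n (i+2) :: pvBRows n (i+1) from rfl]
      have hBne : pvBRows n (i+1) = pvBRow n (i+1) :: pvBRows n i := rfl
      rw [hBne, PySem.Chars.join_cons_cons, ← hBne, ← hrec]
      unfold pvBRow
      have hsp : (n - ((i + 2 : Nat) : Int) + 1).toNat = (n - ((i+1 : Nat) : Int)).toNat := by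
        push_cast at hle ⊢; omega
      rw [hsp]
      rw [show (i + 2) - 1 = i + 1 from rfl]
      simp [List.append_assoc]
      omega

theorem pv_main (n : Int) : get_a_down_arrow_of n = get_a_down_arrow_of_alt n := by
  unfold get_a_down_arrow_of get_a_down_arrow_of_alt
  by_cases h : n ≤ 0
  · have h0 : n.toNat = 0 := by omega
    rw [h0, pvRange_down_nil n h]
    simp [pvA_loop, PySem.Chars.join_nil]
  · have hn : ((n.toNat : Nat) : Int) = n := by omega
    have hA : pvA_loop n n.toNat n [] = pvARows n n.toNat := by
      have h2 := pvA_loop_eq n n.toNat []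
      rwa [hn, List.nil_append] at h2
    have hfull : PySem.Chars.join [] ((PySem.List.pyRange 1 (n + 1) 1).map pvB_last) = pvTable n.toNat := by
      have h1 : n + 1 = 1 + ((n.toNat : Nat) : Int) := by omega
      rw [h1]
      rw [show (PySem.List.pyRange 1 (1 + ((n.toNat : Nat) : Int)) 1).map pvB_last =
          (PySem.List.pyRange 1 (1 + ((n.toNat : Nat) : Int)) 1).map pvA_last from rfl]
      exact pvJoin_table n.toNat
    have hB : (PySem.List.pyRange n 0 (-1)).map (pvB_row n (pvTable n.toNat)) = pvBRows n n.toNat := by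
      have h2 := pvB_rows_eq n n.toNat (by omega)
      rwa [hn] at h2
    have hshift := pvJoin_shift n n.toNat (by omega) (by omega)
    rw [show (n - ((n.toNat : Nat) : Int)).toNat = 0 by omega] at hshift
    simp only [List.replicate, List.nil_append] at hshift
    simp only [hfull, hA, hB, hshift]

-- ===== VERDICT (by name: the statement is the Claim_ definition above) =====
theorem get_a_down_arrow_of_spec : Claim_equal_get_a_down_arrow_of := by
  intro n _
  unfold Spec_get_a_down_arrow_of
  exact pv_main n
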